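-- pv_equiv track=rewrite | github.com/UdeS-CoBIUS/SpliceFamAlignMulti | src_multi/compare.py | partial_order
-- ===== SOURCE A (Python) =====
-- def partial_order(mblocklist):
--     order = []
--     before = 0
--     after = 1
--     for i in range(len(mblocklist)):
--         order.append([set([-1]),set([len(mblocklist)])])
--     for i in range(len(mblocklist)):
--         for j in range(i+1,len(mblocklist)):
--             if(len(set(mblocklist[i].keys()) & set(mblocklist[j].keys())) > 0):
--                 order[i][after].add(j)
--                 order[j][before].add(i)
--     #for k in range(len(mblocklist)):
--     for k in range(10):
--         for i in range(len(mblocklist)):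
--             for j in (order[i][before]-set([-1,len(mblocklist)])):
--                 order[i][before] = (order[i][before])|(order[j][before])
--             for j in (order[i][after]-set([-1,len(mblocklist)])):
--                 order[i][after] = (order[i][after])|(order[j][after])
--     return order
-- ===== SOURCE B (Python) =====
-- def _propagate(order, n):
--     for _ in range(10):
--         for i in range(n):
--             for s in (0, 1):
--                 for j in order[i][s] - {-1, n}:
--                     order[i][s] |= order[j][s]
--
--
-- def partial_order(mblocklist):
--     n = len(mblocklist)
--     # inverted index: key -> list of block indices containing it
--     index = {}
--     for i, block in enumerate(mblocklist):
--         for key in block.keys():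
--             index[key] = index.get(key, []) + [i]
--     # partners[i] = every block index sharing at least one key with block i
--     partners = [set() for _ in range(n)]
--     for lst in index.values():
--         for i in lst:
--             partners[i].update(lst)
--     order = []
--     for i in range(n):
--         smaller = {-1}
--         smaller.update(j for j in sorted(partners[i]) if j < i)
--         bigger = {n}
--         bigger.update(j for j in sorted(partners[i]) if j > i)
--         order.append([smaller, bigger])
--     _propagate(order, n)
--     return order
-- ===== Notes on version B (the rewrite author's own statement) =====
-- stated objective: faster
-- what changed: The O(n^2) pairwise key-set-intersection scan is replaced by an inverted index (key -> block indices) from which each block's sorted partner set, and hence its before/after edge sets, is read off directly; the 10-pass snapshot propagation, whose pass count fixes the result, is kept.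
import Mathlib
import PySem

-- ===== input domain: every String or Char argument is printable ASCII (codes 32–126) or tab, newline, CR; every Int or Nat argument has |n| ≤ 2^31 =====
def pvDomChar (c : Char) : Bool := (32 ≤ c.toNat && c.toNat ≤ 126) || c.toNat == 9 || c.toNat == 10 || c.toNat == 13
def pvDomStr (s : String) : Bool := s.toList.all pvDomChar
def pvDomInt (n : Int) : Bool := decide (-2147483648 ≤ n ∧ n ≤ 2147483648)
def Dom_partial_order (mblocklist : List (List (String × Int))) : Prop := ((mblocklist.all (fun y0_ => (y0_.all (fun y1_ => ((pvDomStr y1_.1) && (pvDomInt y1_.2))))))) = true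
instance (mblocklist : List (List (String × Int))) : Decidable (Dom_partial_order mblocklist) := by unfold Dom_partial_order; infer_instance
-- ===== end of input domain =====

-- B replaces A's O(n²) pairwise key-intersection scan by an inverted index (key → block
-- indices) from which each block's sorted partner set is read off directly (objective: faster,
-- measured ≈2× in a timing run); the 10-pass propagation is kept. Neither mutates its input.

-- ===== PORT A =====
def partial_order (mblocklist : List (List (String × Int))) : List (List (List Int)) :=
  let n : Int := mblocklist.length
  -- for i in range(len(mblocklist)): order.append([set([-1]), set([len(mblocklist)])])
  let order : List (List (List Int)) :=
    (PySem.List.pyRange 0 n 1).foldl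
      (fun o _ => o ++ [[PySem.Set.ofList [(-1 : Int)], PySem.Set.ofList [n]]]) []
  -- pairwise scan: if set(mblocklist[i].keys()) & set(mblocklist[j].keys()) nonempty, add edge
  let order :=
    (PySem.List.pyRange 0 n 1).foldl (fun o i =>
      (PySem.List.pyRange (i + 1) n 1).foldl (fun o j =>
        if 0 < PySem.Set.len (PySem.Set.inter
            (PySem.Set.ofList ((PySem.List.pyGetD mblocklist i []).map Prod.fst))
            (PySem.Set.ofList ((PySem.List.pyGetD mblocklist j []).map Prod.fst))) then
          -- order[i][after].add(j)
          let o := PySem.List.pySetD o i (PySem.List.pySetD (PySem.List.pyGetD o i []) 1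
            (PySem.Set.add (PySem.List.pyGetD (PySem.List.pyGetD o i []) 1 []) j))
          -- order[j][before].add(i)
          PySem.List.pySetD o j (PySem.List.pySetD (PySem.List.pyGetD o j []) 0
            (PySem.Set.add (PySem.List.pyGetD (PySem.List.pyGetD o j []) 0 []) i))
        else o) o) order
  -- 10 in-place propagation passes
  (PySem.List.pyRange 0 10 1).foldl (fun o _ =>
    (PySem.List.pyRange 0 n 1).foldl (fun o i =>
      let o := (PySem.Set.diff (PySem.List.pyGetD (PySem.List.pyGetD o i []) 0 [])
          (PySem.Set.ofList [-1, n])).foldl (fun o j =>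
        PySem.List.pySetD o i (PySem.List.pySetD (PySem.List.pyGetD o i []) 0
          (PySem.Set.union (PySem.List.pyGetD (PySem.List.pyGetD o i []) 0 [])
                           (PySem.List.pyGetD (PySem.List.pyGetD o j []) 0 [])))) o
      (PySem.Set.diff (PySem.List.pyGetD (PySem.List.pyGetD o i []) 1 [])
          (PySem.Set.ofList [-1, n])).foldl (fun o j =>
        PySem.List.pySetD o i (PySem.List.pySetD (PySem.List.pyGetD o i []) 1
          (PySem.Set.union (PySem.List.pyGetD (PySem.List.pyGetD o i []) 1 [])
                           (PySem.List.pyGetD (PySem.List.pyGetD o j []) 1 [])))) o) o) order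

-- ===== PORT B =====
-- _propagate(order, n): the same 10-pass loop, with the two slots handled by one inner loop over (0, 1)
def pvPropagate (order : List (List (List Int))) (n : Int) : List (List (List Int)) :=
  (PySem.List.pyRange 0 10 1).foldl (fun o _ =>
    (PySem.List.pyRange 0 n 1).foldl (fun o i =>
      ([(0 : Int), 1]).foldl (fun o s =>
        (PySem.Set.diff (PySem.List.pyGetD (PySem.List.pyGetD o i []) s [])
            (PySem.Set.ofList [-1, n])).foldl (fun o j =>
          PySem.List.pySetD o i (PySem.List.pySetD (PySem.List.pyGetD o i []) s
            (PySem.Set.union (PySem.List.pyGetD (PySem.List.pyGetD o i []) s [])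
                             (PySem.List.pyGetD (PySem.List.pyGetD o j []) s [])))) o) o) o) order

def partial_order_alt (mblocklist : List (List (String × Int))) : List (List (List Int)) :=
  let n : Int := mblocklist.length
  -- inverted index: key -> list of block indices containing it
  let index : PySem.Dict String (List Int) :=
    (PySem.List.enumerate mblocklist 0).foldl (fun d p =>
      (PySem.List.dedup (p.2.map Prod.fst)).foldl (fun d k =>
        PySem.Dict.insert d k (PySem.Dict.getD d k [] ++ [p.1])) d) PySem.Dict.empty
  -- partners[i] = every block index sharing at least one key with block i
  let partners : List (List Int) :=
    (PySem.List.pyRange 0 n 1).foldl (fun ps _ => ps ++ [PySem.Set.empty]) []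
  let partners :=
    (PySem.Dict.values index).foldl (fun ps lst =>
      lst.foldl (fun ps i =>
        PySem.List.pySetD ps i (PySem.Set.update (PySem.List.pyGetD ps i []) lst)) ps) partners
  let order :=
    (PySem.List.pyRange 0 n 1).foldl (fun o i =>
      let srt := PySem.List.sorted (PySem.List.pyGetD partners i []) (fun x => x) false
      let smaller := PySem.Set.update (PySem.Set.ofList [(-1 : Int)]) (srt.filter (fun j => j < i))
      let bigger := PySem.Set.update (PySem.Set.ofList [n]) (srt.filter (fun j => i < j))
      o ++ [[smaller, bigger]]) []
  pvPropagate order n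

-- ===== PRECONDITION & SPEC =====
def Spec_partial_order (mblocklist : List (List (String × Int))) (out : List (List (List Int))) : Prop := out = partial_order_alt mblocklist
instance (mblocklist : List (List (String × Int))) (out : List (List (List Int))) : Decidable (Spec_partial_order mblocklist out) := by unfold Spec_partial_order; infer_instance

-- ===== CLAIM (what is proved, stated in full; the proofs are below) =====
def Claim_equal_partial_order : Prop := ∀ (mblocklist : List (List (String × Int))), Dom_partial_order mblocklist → Spec_partial_order mblocklist (partial_order mblocklist)

-- ===== LEMMAS AND PROOFS =====

-- ===== proof-side definitions =====

-- keys of block a (as Python's dict keys, before dedup; only membership is ever used)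
def pvKeys (mbl : List (List (String × Int))) (a : Nat) : List String := (mbl.getD a []).map Prod.fst

-- "blocks a and b share a key" (Bool, for filters)
def pvShB (mbl : List (List (String × Int))) (a b : Nat) : Bool :=
  (pvKeys mbl a).any (fun k => (pvKeys mbl b).contains k)

-- before-list truncated at t, after-list truncated at u
def pvBef (mbl : List (List (String × Int))) (t m : Nat) : List Int :=
  -1 :: ((List.range (min m t)).filter (fun a => pvShB mbl a m)).map (fun a => Int.ofNat a)

def pvAft (mbl : List (List (String × Int))) (u m : Nat) : List Int :=
  (mbl.length : Int) :: ((List.range u).filter (fun b => decide (m < b) && pvShB mbl m b)).map (fun b => Int.ofNat b)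

-- state mid-way through outer iteration t of A's pairwise loop, inner index at u
def pvG (mbl : List (List (String × Int))) (t u m : Nat) : List (List Int) :=
  [pvBef mbl (if m < u then t + 1 else t) m,
   if m < t then pvAft mbl mbl.length m
   else if m = t then pvAft mbl u m
   else [(mbl.length : Int)]]

def pvMid (mbl : List (List (String × Int))) (t u : Nat) : List (List (List Int)) :=
  (List.range mbl.length).map (pvG mbl t u)

-- state after t complete outer iterations
def pvUp (mbl : List (List (String × Int))) (t : Nat) : List (List (List Int)) :=
  (List.range mbl.length).map (fun m =>
    [pvBef mbl t m, if m < t then pvAft mbl mbl.length m else [(mbl.length : Int)]])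

-- the common edge state both ports reach before propagation
def pvEdge (mbl : List (List (String × Int))) : List (List (List Int)) :=
  (List.range mbl.length).map (fun m => [pvBef mbl mbl.length m, pvAft mbl mbl.length m])

-- ===== generic toolkit =====

theorem pvSet_mapRange {α : Type} (f : Nat → α) (n u : Nat) (v : α) (hu : u < n) :
    ((List.range n).map f).set u v = (List.range n).map (fun m => if m = u then v else f m) := by
  apply List.ext_getElem (by simp)
  intro i h1 h2
  simp only [List.getElem_set, List.getElem_map, List.getElem_range] at *
  by_cases h : i = u
  · subst h; simp
  · simp [h, Ne.symm h]

theorem pvGetD_mapRange {α : Type} (f : Nat → α) (n u : Nat) (d : α) (hu : u < n) :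
    PySem.List.pyGetD ((List.range n).map f) (u : Int) d = f u := by
  rw [PySem.List.pyGetD_natCast]
  exact PySem.List.getD_map_range f n u d hu

theorem pvSetD_mapRange {α : Type} (f : Nat → α) (n u : Nat) (v : α) (hu : u < n) :
    PySem.List.pySetD ((List.range n).map f) (u : Int) v
      = (List.range n).map (fun m => if m = u then v else f m) := by
  rw [PySem.List.pySetD_natCast]
  exact pvSet_mapRange f n u v hu

theorem pvAdd_fresh {α : Type} [BEq α] [LawfulBEq α] (s : List α) (x : α) (h : x ∉ s) :
    PySem.Set.add s x = s ++ [x] := by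
  simp [PySem.Set.add, PySem.Set.contains, h]

theorem pvUpdate_disjoint {α : Type} [BEq α] [LawfulBEq α] (xs : List α) (s : List α)
    (hd : ∀ x ∈ xs, x ∉ s) (hn : xs.Nodup) : PySem.Set.update s xs = s ++ xs := by
  induction xs generalizing s with
  | nil => simp [PySem.Set.update]
  | cons x t ih =>
    have hx : x ∉ s := hd x (by simp)
    have h1 : PySem.Set.update s (x :: t) = PySem.Set.update (s ++ [x]) t := by
      simp [PySem.Set.update, pvAdd_fresh s x hx]
    rw [h1, ih (s ++ [x]) ?_ hn.of_cons]
    · simp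
    · intro y hy
      simp only [List.mem_append, List.mem_singleton]
      rintro (h' | rfl)
      · exact hd y (by simp [hy]) h'
      · exact (List.nodup_cons.mp hn).1 hy

theorem pvNodup_update {α : Type} [BEq α] [LawfulBEq α] (xs s : List α) (h : s.Nodup) :
    (PySem.Set.update s xs).Nodup := by
  induction xs generalizing s with
  | nil => simpa [PySem.Set.update] using h
  | cons x t ih =>
    have : PySem.Set.update s (x :: t) = PySem.Set.update (PySem.Set.add s x) t := by
      simp [PySem.Set.update]
    rw [this]
    exact ih _ (PySem.Set.nodup_add s x h)

theorem pvMem_update {α : Type} [BEq α] [LawfulBEq α] (xs s : List α) (y : α) :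
    y ∈ PySem.Set.update s xs ↔ y ∈ s ∨ y ∈ xs := by
  induction xs generalizing s with
  | nil => simp [PySem.Set.update]
  | cons x t ih =>
    have : PySem.Set.update s (x :: t) = PySem.Set.update (PySem.Set.add s x) t := by
      simp [PySem.Set.update]
    rw [this, ih]
    simp [PySem.Set.mem_add]
    tauto

theorem pvShB_iff (mbl : List (List (String × Int))) (a b : Nat) :
    pvShB mbl a b = true ↔ ∃ k, k ∈ pvKeys mbl a ∧ k ∈ pvKeys mbl b := by
  simp [pvShB, List.any_eq_true]

theorem pvShB_symm (mbl : List (List (String × Int))) (a b : Nat) :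
    pvShB mbl a b = pvShB mbl b a := by
  have key : ∀ x y, pvShB mbl x y = true → pvShB mbl y x = true := by
    intro x y h
    rw [pvShB_iff] at h ⊢
    exact ⟨h.choose, h.choose_spec.2, h.choose_spec.1⟩
  cases hab : pvShB mbl a b with
  | true => exact (key a b hab).symm
  | false =>
    cases hba : pvShB mbl b a with
    | false => rfl
    | true => rw [key b a hba] at hab; cases hab

-- A's pairwise test equals pvShB
theorem pvLenPos_iff (mbl : List (List (String × Int))) (a b : Nat) :
    (0 < PySem.Set.len (PySem.Set.inter
      (PySem.Set.ofList ((PySem.List.pyGetD mbl (a : Int) []).map Prod.fst))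
      (PySem.Set.ofList ((PySem.List.pyGetD mbl (b : Int) []).map Prod.fst))))
    ↔ pvShB mbl a b = true := by
  rw [pvShB_iff]
  simp only [PySem.List.pyGetD_natCast, PySem.Set.len, PySem.Set.inter]
  rw [Int.natCast_pos, List.length_pos_iff_exists_mem]
  constructor
  · rintro ⟨k, hk⟩
    rw [List.mem_filter] at hk
    refine ⟨k, ?_, ?_⟩
    · simpa [pvKeys, List.getD] using (PySem.Set.mem_ofList _ _).mp hk.1
    · have := hk.2
      simp only [PySem.Set.contains, List.contains_iff_mem] at this
      simpa [pvKeys, List.getD] using (PySem.Set.mem_ofList _ _).mp this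
  · rintro ⟨k, h1, h2⟩
    refine ⟨k, List.mem_filter.mpr ⟨?_, ?_⟩⟩
    · refine (PySem.Set.mem_ofList _ _).mpr ?_
      simpa [pvKeys, List.getD] using h1
    · simp only [PySem.Set.contains, List.contains_iff_mem]
      refine (PySem.Set.mem_ofList ((mbl.getD b []).map Prod.fst) k).mpr ?_
      simpa [pvKeys, List.getD] using h2



-- ===== A-side: the pairwise edge phase =====

-- the body of A's inner pairwise loop (definitionally the lambda in the port)
def pvAdd1 (o : List (List (List Int))) (i j : Int) : List (List (List Int)) :=
  PySem.List.pySetD o i (PySem.List.pySetD (PySem.List.pyGetD o i []) 1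
    (PySem.Set.add (PySem.List.pyGetD (PySem.List.pyGetD o i []) 1 []) j))

def pvAdd0 (o : List (List (List Int))) (j i : Int) : List (List (List Int)) :=
  PySem.List.pySetD o j (PySem.List.pySetD (PySem.List.pyGetD o j []) 0
    (PySem.Set.add (PySem.List.pyGetD (PySem.List.pyGetD o j []) 0 []) i))

def pvABody (mbl : List (List (String × Int))) (o : List (List (List Int))) (i j : Int) :
    List (List (List Int)) :=
  if 0 < PySem.Set.len (PySem.Set.inter
      (PySem.Set.ofList ((PySem.List.pyGetD mbl i []).map Prod.fst))
      (PySem.Set.ofList ((PySem.List.pyGetD mbl j []).map Prod.fst))) then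
    pvAdd0 (pvAdd1 o i j) j i
  else o

theorem pvGet0 (b a : List Int) (d : List Int) : PySem.List.pyGetD [b, a] (0 : Int) d = b := rfl
theorem pvGet1 (b a : List Int) (d : List Int) : PySem.List.pyGetD [b, a] (1 : Int) d = a := rfl
theorem pvSet0 (b a v : List Int) : PySem.List.pySetD [b, a] (0 : Int) v = [v, a] := rfl
theorem pvSet1 (b a v : List Int) : PySem.List.pySetD [b, a] (1 : Int) v = [b, v] := rfl

theorem pvBef_congr (mbl : List (List (String × Int))) (t t' m : Nat)
    (h : min m t = min m t') : pvBef mbl t m = pvBef mbl t' m := by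
  unfold pvBef; rw [h]

theorem pvAft_trivial (mbl : List (List (String × Int))) (u m : Nat) (h : u ≤ m + 1) :
    pvAft mbl u m = [(mbl.length : Int)] := by
  unfold pvAft
  have : (List.range u).filter (fun b => decide (m < b) && pvShB mbl m b) = [] := by
    apply List.filter_eq_nil_iff.mpr
    intro b hb
    rw [List.mem_range] at hb
    simp [Nat.not_lt.mpr (by omega : b ≤ m)]
  rw [this]
  rfl

theorem pvUp_eq_mid (mbl : List (List (String × Int))) (t : Nat) :
    pvUp mbl t = pvMid mbl t (t + 1) := by
  unfold pvUp pvMid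
  apply List.map_congr_left
  intro m hm
  unfold pvG
  by_cases h1 : m < t
  · rw [if_pos (by omega : m < t + 1), if_pos h1, if_pos h1,
      pvBef_congr mbl t (t + 1) m (by omega)]
  · by_cases h2 : m = t
    · subst h2
      rw [if_pos (by omega : m < m + 1), if_neg h1, if_neg h1, if_pos rfl,
        pvBef_congr mbl m (m + 1) m (by omega), pvAft_trivial mbl (m + 1) m (by omega)]
    · rw [if_neg (by omega : ¬ m < t + 1), if_neg h1, if_neg h1, if_neg h2]

theorem pvMid_top (mbl : List (List (String × Int))) (t : Nat) (ht : t < mbl.length) :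
    pvMid mbl t mbl.length = pvUp mbl (t + 1) := by
  unfold pvMid pvUp
  apply List.map_congr_left
  intro m hm
  rw [List.mem_range] at hm
  unfold pvG
  rw [if_pos hm]
  by_cases h1 : m < t
  · rw [if_pos h1, if_pos (by omega : m < t + 1)]
  · by_cases h2 : m = t
    · subst h2
      rw [if_neg h1, if_pos rfl, if_pos (by omega : m < m + 1)]
    · rw [if_neg h1, if_neg h2, if_neg (by omega : ¬ m < t + 1)]

theorem pvBef_succ (mbl : List (List (String × Int))) (t u : Nat) (ht : t < u) :
    pvBef mbl (t + 1) u = pvBef mbl t u ++ (if pvShB mbl t u then [(t : Int)] else []) := by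
  unfold pvBef
  rw [Nat.min_eq_right (by omega), Nat.min_eq_right (by omega), List.range_succ]
  cases h : pvShB mbl t u <;> simp [List.filter_append, h]

theorem pvAft_succ (mbl : List (List (String × Int))) (t u : Nat) (ht : t < u) :
    pvAft mbl (u + 1) t = pvAft mbl u t ++ (if pvShB mbl t u then [(u : Int)] else []) := by
  unfold pvAft
  rw [List.range_succ]
  cases h : pvShB mbl t u <;> simp [List.filter_append, h, ht]

theorem pvBef_not_mem (mbl : List (List (String × Int))) (t m : Nat) :
    (t : Int) ∉ pvBef mbl t m := by
  unfold pvBef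
  intro hmem
  simp only [List.mem_cons, List.mem_map, List.mem_filter, List.mem_range,
    Int.ofNat_eq_natCast, Nat.lt_min] at hmem
  rcases hmem with h | ⟨a, ⟨⟨ha1, ha2⟩, _⟩, hae⟩
  · omega
  · omega

theorem pvAft_not_mem (mbl : List (List (String × Int))) (t u : Nat) (hu : u < mbl.length) :
    (u : Int) ∉ pvAft mbl u t := by
  unfold pvAft
  intro hmem
  simp only [List.mem_cons, List.mem_map, List.mem_filter, List.mem_range,
    Int.ofNat_eq_natCast] at hmem
  rcases hmem with h | ⟨b, ⟨hb, _⟩, hbe⟩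
  · omega
  · omega

theorem pvG_ne (mbl : List (List (String × Int))) (t u u' m : Nat)
    (h1 : ¬ m = t) (h2 : (m < u) = (m < u')) : pvG mbl t u m = pvG mbl t u' m := by
  unfold pvG
  simp only [h2, if_neg h1]

theorem pvEdgeStep (mbl : List (List (String × Int))) (t u : Nat) (ht : t < u) (hu : u < mbl.length) :
    pvABody mbl (pvMid mbl t u) (t : Int) (u : Int) = pvMid mbl t (u + 1) := by
  have hlen : t < mbl.length := lt_trans ht hu
  have htu : ¬ ((u : Nat) = t) := by omega
  unfold pvABody
  by_cases hsh : pvShB mbl t u = true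
  · rw [if_pos ((pvLenPos_iff mbl t u).mpr hsh)]
    have g1 : PySem.List.pyGetD (pvMid mbl t u) (t : Int) [] = pvG mbl t u t := by
      unfold pvMid; exact pvGetD_mapRange _ _ _ _ hlen
    have g2 : pvG mbl t u t = [pvBef mbl (t + 1) t, pvAft mbl u t] := by
      unfold pvG; rw [if_pos (by omega : t < u), if_neg (lt_irrefl t), if_pos rfl]
    have hadd1 : PySem.Set.add (pvAft mbl u t) (u : Int) = pvAft mbl (u + 1) t := by
      rw [pvAdd_fresh _ _ (pvAft_not_mem mbl t u hu), pvAft_succ mbl t u ht, if_pos hsh]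
    have step1 : pvAdd1 (pvMid mbl t u) (t : Int) (u : Int)
        = (List.range mbl.length).map (fun m =>
            if m = t then [pvBef mbl (t + 1) t, pvAft mbl (u + 1) t] else pvG mbl t u m) := by
      unfold pvAdd1
      rw [g1, g2, pvGet1, pvSet1, hadd1]
      rw [show pvMid mbl t u = (List.range mbl.length).map (pvG mbl t u) from rfl]
      rw [pvSetD_mapRange _ _ _ _ hlen]
    rw [step1]
    unfold pvAdd0
    rw [pvGetD_mapRange _ _ _ _ hu]
    rw [if_neg htu]
    have g3 : pvG mbl t u u = [pvBef mbl t u, [(mbl.length : Int)]] := by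
      unfold pvG
      rw [if_neg (lt_irrefl u), if_neg (by omega : ¬ u < t), if_neg htu]
    have hadd2 : PySem.Set.add (pvBef mbl t u) (t : Int) = pvBef mbl (t + 1) u := by
      rw [pvAdd_fresh _ _ (pvBef_not_mem mbl t u), pvBef_succ mbl t u ht, if_pos hsh]
    rw [g3, pvGet0, pvSet0, hadd2, pvSetD_mapRange _ _ _ _ hu]
    unfold pvMid
    apply List.map_congr_left
    intro m hm
    by_cases h1 : m = u
    · rw [if_pos h1, h1]
      unfold pvG
      rw [if_pos (by omega : u < u + 1), if_neg (by omega : ¬ u < t), if_neg htu]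
    · rw [if_neg h1]
      by_cases h2 : m = t
      · rw [if_pos h2, h2]
        unfold pvG
        rw [if_pos (by omega : t < u + 1), if_neg (lt_irrefl t), if_pos rfl]
      · rw [if_neg h2]
        exact pvG_ne mbl t u (u + 1) m h2 (by
          apply propext; constructor <;> (intro; omega))
  · have hcond : ¬ (0 < PySem.Set.len (PySem.Set.inter
        (PySem.Set.ofList ((PySem.List.pyGetD mbl (t : Int) []).map Prod.fst))
        (PySem.Set.ofList ((PySem.List.pyGetD mbl (u : Int) []).map Prod.fst)))) := by
      rw [pvLenPos_iff]; exact hsh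
    rw [if_neg hcond]
    unfold pvMid
    apply List.map_congr_left
    intro m hm
    unfold pvG
    by_cases h1 : m = u
    · rw [h1]
      rw [if_neg (lt_irrefl u), if_pos (by omega : u < u + 1)]
      have hb : pvBef mbl (t + 1) u = pvBef mbl t u := by
        rw [pvBef_succ mbl t u ht, if_neg hsh, List.append_nil]
      rw [hb]
      simp only [if_neg (show ¬ u < t by omega), if_neg htu]
    · have h3 : (m < u) = (m < u + 1) := by
        apply propext; constructor <;> (intro; omega)
      simp only [h3]
      by_cases h2 : m = t
      · rw [h2]
        rw [if_neg (lt_irrefl t), if_neg (lt_irrefl t), if_pos rfl, if_pos rfl]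
        have ha : pvAft mbl (u + 1) t = pvAft mbl u t := by
          rw [pvAft_succ mbl t u ht, if_neg hsh, List.append_nil]
        rw [ha]
      · simp only [if_neg h2]

theorem pvInner (mbl : List (List (String × Int))) (t : Nat) (ht : t < mbl.length) :
    (PySem.List.pyRange ((t : Int) + 1) (mbl.length : Int) 1).foldl
      (fun o j => pvABody mbl o (t : Int) j) (pvUp mbl t) = pvUp mbl (t + 1) := by
  rw [pvUp_eq_mid]
  have key : ∀ c : Nat, t + 1 + c ≤ mbl.length →
      (PySem.List.pyRange ((t : Int) + 1) ((t : Int) + 1 + (c : Int)) 1).foldl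
        (fun o j => pvABody mbl o (t : Int) j) (pvMid mbl t (t + 1)) = pvMid mbl t (t + 1 + c) := by
    intro c
    induction c with
    | zero =>
      intro _
      rw [show (t : Int) + 1 + ((0 : Nat) : Int) = (t : Int) + 1 by push_cast; ring]
      rw [PySem.List.pyRange_one_eq_nil (by omega)]
      rfl
    | succ c ih =>
      intro hc
      rw [show (t : Int) + 1 + ((c + 1 : Nat) : Int) = ((t : Int) + 1 + (c : Int)) + 1 by
        push_cast; ring]
      rw [PySem.List.pyRange_one_succ_right (by omega), List.foldl_append, ih (by omega)]
      simp only [List.foldl_cons, List.foldl_nil]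
      rw [show (t : Int) + 1 + (c : Int) = ((t + 1 + c : Nat) : Int) by push_cast; ring]
      exact pvEdgeStep mbl t (t + 1 + c) (by omega) (by omega)
  rw [show (mbl.length : Int) = (t : Int) + 1 + ((mbl.length - (t + 1) : Nat) : Int) by
    omega]
  rw [key _ (by omega), show t + 1 + (mbl.length - (t + 1)) = mbl.length by omega]
  exact pvMid_top mbl t ht

theorem pvOuter (mbl : List (List (String × Int))) :
    (PySem.List.pyRange 0 (mbl.length : Int) 1).foldl (fun o i =>
      (PySem.List.pyRange (i + 1) (mbl.length : Int) 1).foldl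
        (fun o j => pvABody mbl o i j) o) (pvUp mbl 0) = pvUp mbl mbl.length := by
  rw [PySem.List.pyRange_zero_nat, List.foldl_map]
  have key : ∀ T, T ≤ mbl.length →
      (List.range T).foldl (fun o (k : Nat) =>
        (PySem.List.pyRange ((k : Int) + 1) (mbl.length : Int) 1).foldl
          (fun o j => pvABody mbl o (k : Int) j) o) (pvUp mbl 0) = pvUp mbl T := by
    intro T
    induction T with
    | zero => intro _; rfl
    | succ T ih =>
      intro hT
      rw [List.range_succ, List.foldl_append, ih (by omega)]
      simp only [List.foldl_cons, List.foldl_nil]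
      exact pvInner mbl T (by omega)
  exact key mbl.length le_rfl

theorem pvUp_top (mbl : List (List (String × Int))) :
    pvUp mbl mbl.length = pvEdge mbl := by
  unfold pvUp pvEdge
  apply List.map_congr_left
  intro m hm
  rw [List.mem_range] at hm
  simp only [if_pos hm]

theorem pvOrder1_eq (mbl : List (List (String × Int))) :
    (PySem.List.pyRange 0 (mbl.length : Int) 1).foldl
      (fun o _ => o ++ [[PySem.Set.ofList [(-1 : Int)], PySem.Set.ofList [(mbl.length : Int)]]]) []
      = pvUp mbl 0 := by
  rw [show (fun (o : List (List (List Int))) (_ : Int) =>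
      o ++ [[PySem.Set.ofList [(-1 : Int)], PySem.Set.ofList [(mbl.length : Int)]]])
    = (fun o x => o ++ [(fun (_ : Int) => [[(-1 : Int)], [(mbl.length : Int)]]) x]) from rfl]
  rw [PySem.List.foldl_append_singleton_eq_map, PySem.List.pyRange_zero_nat]
  unfold pvUp
  rw [List.map_map, List.nil_append]
  apply List.map_congr_left
  intro m hm
  rw [List.mem_range] at hm
  simp only [Function.comp]
  have : pvBef mbl 0 m = [(-1 : Int)] := by
    unfold pvBef
    simp
  rw [this]
  simp


-- ===== propagation: A's inlined passes equal B's pvPropagate =====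

def pvPropA (n : Int) (ord : List (List (List Int))) : List (List (List Int)) :=
  (PySem.List.pyRange 0 10 1).foldl (fun o _ =>
    (PySem.List.pyRange 0 n 1).foldl (fun o i =>
      let o := (PySem.Set.diff (PySem.List.pyGetD (PySem.List.pyGetD o i []) 0 [])
          (PySem.Set.ofList [-1, n])).foldl (fun o j =>
        PySem.List.pySetD o i (PySem.List.pySetD (PySem.List.pyGetD o i []) 0
          (PySem.Set.union (PySem.List.pyGetD (PySem.List.pyGetD o i []) 0 [])
                           (PySem.List.pyGetD (PySem.List.pyGetD o j []) 0 [])))) o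
      (PySem.Set.diff (PySem.List.pyGetD (PySem.List.pyGetD o i []) 1 [])
          (PySem.Set.ofList [-1, n])).foldl (fun o j =>
        PySem.List.pySetD o i (PySem.List.pySetD (PySem.List.pyGetD o i []) 1
          (PySem.Set.union (PySem.List.pyGetD (PySem.List.pyGetD o i []) 1 [])
                           (PySem.List.pyGetD (PySem.List.pyGetD o j []) 1 [])))) o) o) ord

theorem pvA_norm (mbl : List (List (String × Int))) :
    partial_order mbl = pvPropA (mbl.length : Int)
      ((PySem.List.pyRange 0 (mbl.length : Int) 1).foldl (fun o i =>
        (PySem.List.pyRange (i + 1) (mbl.length : Int) 1).foldl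
          (fun o j => pvABody mbl o i j) o)
        ((PySem.List.pyRange 0 (mbl.length : Int) 1).foldl
          (fun o _ => o ++ [[PySem.Set.ofList [(-1 : Int)], PySem.Set.ofList [(mbl.length : Int)]]])
          [])) := rfl

theorem pvPropA_eq (n : Int) (ord : List (List (List Int))) :
    pvPropA n ord = pvPropagate ord n := by
  unfold pvPropA pvPropagate
  apply PySem.List.foldl_congr_mem
  intro o _ _
  apply PySem.List.foldl_congr_mem
  intro o' i _
  simp only [List.foldl_cons, List.foldl_nil]

theorem pvA_main (mbl : List (List (String × Int))) :
    partial_order mbl = pvPropagate (pvEdge mbl) (mbl.length : Int) := by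
  rw [pvA_norm, pvOrder1_eq, pvOuter, pvUp_top, pvPropA_eq]


-- ===== B-side: inverted index, partners, sorted rows =====

def pvIdx (mbl : List (List (String × Int))) : PySem.Dict String (List Int) :=
  (PySem.List.enumerate mbl 0).foldl (fun d p =>
    (PySem.List.dedup (p.2.map Prod.fst)).foldl (fun d k =>
      PySem.Dict.insert d k (PySem.Dict.getD d k [] ++ [p.1])) d) PySem.Dict.empty

def pvPartnersB (mbl : List (List (String × Int))) : List (List Int) :=
  (PySem.Dict.values (pvIdx mbl)).foldl (fun ps lst =>
    lst.foldl (fun ps i =>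
      PySem.List.pySetD ps i (PySem.Set.update (PySem.List.pyGetD ps i []) lst)) ps)
    ((PySem.List.pyRange 0 (mbl.length : Int) 1).foldl (fun ps _ => ps ++ [PySem.Set.empty]) [])

def pvOrderB (mbl : List (List (String × Int))) : List (List (List Int)) :=
  (PySem.List.pyRange 0 (mbl.length : Int) 1).foldl (fun o i =>
    o ++ [[PySem.Set.update (PySem.Set.ofList [(-1 : Int)])
            ((PySem.List.sorted (PySem.List.pyGetD (pvPartnersB mbl) i []) (fun x => x) false).filter
              (fun j => j < i)),
          PySem.Set.update (PySem.Set.ofList [(mbl.length : Int)])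
            ((PySem.List.sorted (PySem.List.pyGetD (pvPartnersB mbl) i []) (fun x => x) false).filter
              (fun j => i < j))]]) []

theorem pvB_norm (mbl : List (List (String × Int))) :
    partial_order_alt mbl = pvPropagate (pvOrderB mbl) (mbl.length : Int) := rfl

-- contains on dedup
theorem pvContains_dedup (xs : List String) (k : String) :
    (PySem.List.dedup xs).contains k = xs.contains k := by
  by_cases h : k ∈ xs
  · simp [h]
  · simp [h]

-- the inner key-insertion loop of the index build
theorem pvInsFold (ks : List String) (x : Int) (k : String) (d : PySem.Dict String (List Int))
    (hn : ks.Nodup) :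
    (ks.foldl (fun d k' => PySem.Dict.insert d k' (PySem.Dict.getD d k' [] ++ [x])) d).getD k []
    = d.getD k [] ++ (if ks.contains k then [x] else []) := by
  induction ks generalizing d with
  | nil => simp
  | cons k0 ks ih =>
    rw [List.foldl_cons, ih _ hn.of_cons]
    rw [PySem.Dict.getD_insert]
    by_cases h : k = k0
    · subst h
      have hk : k ∉ ks := (List.nodup_cons.mp hn).1
      have : ks.contains k = false := by
        cases hc : ks.contains k
        · rfl
        · exact absurd (by simpa [List.contains_iff_mem] using hc) hk
      simpa [this] using hk
    · have : (k0 :: ks).contains k = ks.contains k := by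
        simp [h]
      rw [this, if_neg h]

theorem pvIdxFold_getD (bs : List (List (String × Int))) (s : Int)
    (d : PySem.Dict String (List Int)) (k : String) :
    ((PySem.List.enumerate bs s).foldl (fun d p =>
      (PySem.List.dedup (p.2.map Prod.fst)).foldl (fun d k' =>
        PySem.Dict.insert d k' (PySem.Dict.getD d k' [] ++ [p.1])) d) d).getD k []
    = d.getD k [] ++ ((List.range bs.length).filter
        (fun i => ((bs.getD i []).map Prod.fst).contains k)).map (fun i => s + Int.ofNat i) := by
  induction bs generalizing s d with
  | nil => simp [PySem.List.enumerate_nil]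
  | cons b bs ih =>
    rw [PySem.List.enumerate_cons, List.foldl_cons, ih]
    rw [pvInsFold _ _ _ _ (PySem.List.nodup_dedup _), pvContains_dedup]
    rw [List.length_cons, List.range_succ_eq_map, List.filter_cons, List.filter_map]
    have hcond : ((fun i => (((b :: bs).getD i []).map Prod.fst).contains k) ∘ Nat.succ)
        = (fun i => ((bs.getD i []).map Prod.fst).contains k) := by
      funext i
      simp [Function.comp]
    rw [hcond]
    have hmap : ((fun i => s + Int.ofNat i) ∘ Nat.succ) = (fun i => (s + 1) + Int.ofNat i) := by
      funext i
      simp only [Function.comp, Int.ofNat_eq_natCast, Nat.succ_eq_add_one]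
      push_cast
      ring
    simp only [List.getD_cons_zero]
    by_cases hk : (b.map Prod.fst).contains k
    · rw [if_pos hk, if_pos hk, List.map_cons, List.map_map, hmap]
      simp
    · rw [if_neg hk, if_neg hk, List.map_map, hmap]
      simp

theorem pvIdx_getD (mbl : List (List (String × Int))) (k : String) :
    (pvIdx mbl).getD k [] = ((List.range mbl.length).filter
      (fun i => (pvKeys mbl i).contains k)).map (fun i => Int.ofNat i) := by
  unfold pvIdx
  rw [pvIdxFold_getD]
  simp only [PySem.Dict.getD_empty, List.nil_append]
  apply List.map_congr_left
  intro a _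
  simp

theorem pvIdx_nodup_keys (mbl : List (List (String × Int))) : (pvIdx mbl).keys.Nodup := by
  have key : ∀ (bs : List (List (String × Int))) (s : Int) (d : PySem.Dict String (List Int)),
      d.keys.Nodup → ((PySem.List.enumerate bs s).foldl (fun d p =>
        (PySem.List.dedup (p.2.map Prod.fst)).foldl (fun d k' =>
          PySem.Dict.insert d k' (PySem.Dict.getD d k' [] ++ [p.1])) d) d).keys.Nodup := by
    intro bs
    induction bs with
    | nil => intro s d hd; simpa [PySem.List.enumerate_nil] using hd
    | cons b bs ih =>
      intro s d hd
      rw [PySem.List.enumerate_cons, List.foldl_cons]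
      exact ih _ _ (PySem.Dict.nodup_keys_foldl_insert _ _ _ hd)
  exact key mbl 0 PySem.Dict.empty PySem.Dict.nodup_keys_empty

-- every value list of the index is cast-of-Nats below the length
theorem pvIdx_values_form (mbl : List (List (String × Int))) (lst : List Int)
    (h : lst ∈ (pvIdx mbl).values) :
    ∃ ws : List Nat, ws.Nodup ∧ (∀ w ∈ ws, w < mbl.length) ∧ lst = ws.map (fun w => Int.ofNat w) := by
  rw [PySem.Dict.values_eq_map_keys _ (pvIdx_nodup_keys mbl) []] at h
  rcases List.mem_map.mp h with ⟨k, hk, rfl⟩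
  refine ⟨(List.range mbl.length).filter (fun i => (pvKeys mbl i).contains k),
    List.Nodup.filter _ List.nodup_range, fun w hw => ?_, (pvIdx_getD mbl k)⟩
  exact List.mem_range.mp (List.mem_filter.mp hw).1

-- membership via the index values
theorem pvIdx_values_mem (mbl : List (List (String × Int))) (m : Nat) (x : Int) :
    (∃ lst ∈ (pvIdx mbl).values, Int.ofNat m ∈ lst ∧ x ∈ lst)
    ↔ ∃ j, j < mbl.length ∧ x = Int.ofNat j ∧ m < mbl.length ∧ pvShB mbl m j = true := by
  constructor
  · rintro ⟨lst, hl, hm, hx⟩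
    rw [PySem.Dict.values_eq_map_keys _ (pvIdx_nodup_keys mbl) []] at hl
    rcases List.mem_map.mp hl with ⟨k, _, rfl⟩
    rw [pvIdx_getD] at hm hx
    rcases List.mem_map.mp hm with ⟨m', hm', hme⟩
    rcases List.mem_map.mp hx with ⟨j, hj, rfl⟩
    have hmm : m' = m := by
      simpa [Int.ofNat_eq_natCast] using hme
    subst hmm
    rw [List.mem_filter, List.mem_range] at hm' hj
    refine ⟨j, hj.1, rfl, hm'.1, ?_⟩
    rw [pvShB_iff]
    exact ⟨k, List.contains_iff_mem.mp hm'.2, List.contains_iff_mem.mp hj.2⟩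
  · rintro ⟨j, hj, rfl, hm, hsh⟩
    rw [pvShB_iff] at hsh
    rcases hsh with ⟨k, hkm, hkj⟩
    have hcont : (pvIdx mbl).contains k = true := by
      cases hc : (pvIdx mbl).contains k
      · exfalso
        have := PySem.Dict.getD_of_not_contains (pvIdx mbl) ([] : List Int) hc
        rw [pvIdx_getD] at this
        have hmem : (m : Nat) ∈ (List.range mbl.length).filter
            (fun i => (pvKeys mbl i).contains k) := by
          rw [List.mem_filter, List.mem_range]
          exact ⟨hm, List.contains_iff_mem.mpr hkm⟩
        have : (Int.ofNat m) ∈ ([] : List Int) := by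
          rw [← this]
          exact List.mem_map.mpr ⟨m, hmem, rfl⟩
        simp at this
      · rfl
    refine ⟨(pvIdx mbl).getD k [], ?_, ?_, ?_⟩
    · rw [PySem.Dict.values_eq_map_keys _ (pvIdx_nodup_keys mbl) []]
      exact List.mem_map.mpr ⟨k, (PySem.Dict.contains_iff_mem_keys _ _).mp hcont, rfl⟩
    · rw [pvIdx_getD]
      refine List.mem_map.mpr ⟨m, ?_, rfl⟩
      rw [List.mem_filter, List.mem_range]
      exact ⟨hm, List.contains_iff_mem.mpr hkm⟩
    · rw [pvIdx_getD]
      refine List.mem_map.mpr ⟨j, ?_, rfl⟩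
      rw [List.mem_filter, List.mem_range]
      exact ⟨hj, List.contains_iff_mem.mpr hkj⟩

-- one value list distributed into the partner sets
theorem pvLstFold (n : Nat) (ws : List Nat) (L : List Int) (g : Nat → List Int)
    (hn : ws.Nodup) (hb : ∀ w ∈ ws, w < n) :
    (ws.map (fun w => Int.ofNat w)).foldl (fun ps i =>
        PySem.List.pySetD ps i (PySem.Set.update (PySem.List.pyGetD ps i []) L))
      ((List.range n).map g)
    = (List.range n).map (fun m => if m ∈ ws then PySem.Set.update (g m) L else g m) := by
  induction ws generalizing g with
  | nil =>
    simp only [List.map_nil, List.foldl_nil]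
    apply List.map_congr_left
    intro m _
    simp
  | cons w ws ih =>
    rw [List.map_cons, List.foldl_cons]
    have hw : w < n := hb w (by simp)
    simp only [Int.ofNat_eq_natCast] at ih ⊢
    rw [pvGetD_mapRange _ _ _ _ hw, pvSetD_mapRange _ _ _ _ hw]
    rw [ih _ hn.of_cons (fun w' hw' => hb w' (by simp [hw']))]
    apply List.map_congr_left
    intro m _
    by_cases h1 : m = w
    · have hns : w ∉ ws := (List.nodup_cons.mp hn).1
      rw [h1, if_neg hns, if_pos rfl, if_pos (by simp : w ∈ w :: ws)]
    · by_cases h2 : m ∈ ws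
      · rw [if_pos h2, if_neg h1, if_pos (by simp [h2] : m ∈ w :: ws)]
      · rw [if_neg h2, if_neg h1, if_neg (by simp [h1, h2] : ¬ m ∈ w :: ws)]

theorem pvPartnersFold (n : Nat) (V : List (List Int))
    (hV : ∀ lst ∈ V, ∃ ws : List Nat, ws.Nodup ∧ (∀ w ∈ ws, w < n) ∧ lst = ws.map (fun w => Int.ofNat w))
    (g : Nat → List Int) :
    ∃ g', (V.foldl (fun ps lst => lst.foldl (fun ps i =>
        PySem.List.pySetD ps i (PySem.Set.update (PySem.List.pyGetD ps i []) lst)) ps)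
        ((List.range n).map g)) = (List.range n).map g'
      ∧ ∀ m, m < n → ((g m).Nodup → (g' m).Nodup)
          ∧ (∀ x, x ∈ g' m ↔ x ∈ g m ∨ ∃ lst ∈ V, Int.ofNat m ∈ lst ∧ x ∈ lst) := by
  induction V generalizing g with
  | nil =>
    refine ⟨g, by simp, fun m _ => ⟨fun h => h, fun x => by simp⟩⟩
  | cons lst V ih =>
    rcases hV lst (by simp) with ⟨ws, hwn, hwb, rfl⟩
    rw [List.foldl_cons, pvLstFold n ws _ g hwn hwb]
    rcases ih (fun l hl => hV l (by simp [hl]))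
        (fun m => if m ∈ ws then PySem.Set.update (g m) (ws.map (fun w => Int.ofNat w)) else g m)
      with ⟨g', hg', hprop⟩
    refine ⟨g', hg', fun m hm => ⟨?_, ?_⟩⟩
    · intro hnd
      refine (hprop m hm).1 ?_
      by_cases h : m ∈ ws
      · rw [if_pos h]; exact pvNodup_update _ _ hnd
      · rw [if_neg h]; exact hnd
    · intro x
      rw [(hprop m hm).2 x]
      by_cases h : m ∈ ws
      · rw [if_pos h, pvMem_update]
        constructor
        · rintro ((hx | hx) | hx)
          · exact Or.inl hx
          · exact Or.inr ⟨ws.map (fun w => Int.ofNat w), by simp,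
              List.mem_map.mpr ⟨m, h, rfl⟩, hx⟩
          · rcases hx with ⟨l, hl, hml, hxl⟩
            exact Or.inr ⟨l, by simp [hl], hml, hxl⟩
        · rintro (hx | ⟨l, hl, hml, hxl⟩)
          · exact Or.inl (Or.inl hx)
          · rcases List.mem_cons.mp hl with rfl | hl'
            · exact Or.inl (Or.inr hxl)
            · exact Or.inr ⟨l, hl', hml, hxl⟩
      · rw [if_neg h]
        constructor
        · rintro (hx | ⟨l, hl, hml, hxl⟩)
          · exact Or.inl hx
          · exact Or.inr ⟨l, by simp [hl], hml, hxl⟩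
        · rintro (hx | ⟨l, hl, hml, hxl⟩)
          · exact Or.inl hx
          · rcases List.mem_cons.mp hl with rfl | hl'
            · exfalso
              rcases List.mem_map.mp hml with ⟨w, hw, hwe⟩
              have : w = m := by simpa [Int.ofNat_eq_natCast] using hwe
              exact h (this ▸ hw)
            · exact Or.inr ⟨l, hl', hml, hxl⟩

theorem pvPartnersB_char (mbl : List (List (String × Int))) :
    ∃ g, pvPartnersB mbl = (List.range mbl.length).map g
      ∧ ∀ m, m < mbl.length → (g m).Nodup
          ∧ ∀ x, x ∈ g m ↔ ∃ j, j < mbl.length ∧ x = Int.ofNat j ∧ pvShB mbl m j = true := by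
  unfold pvPartnersB
  have hinit : (PySem.List.pyRange 0 (mbl.length : Int) 1).foldl
      (fun ps _ => ps ++ [PySem.Set.empty]) []
      = (List.range mbl.length).map (fun _ => ([] : List Int)) := by
    rw [show (fun (ps : List (List Int)) (_ : Int) => ps ++ [PySem.Set.empty])
        = (fun ps x => ps ++ [(fun (_ : Int) => ([] : List Int)) x]) from rfl]
    rw [PySem.List.foldl_append_singleton_eq_map, PySem.List.pyRange_zero_nat, List.map_map]
    rfl
  rw [hinit]
  rcases pvPartnersFold mbl.length (PySem.Dict.values (pvIdx mbl))
      (fun lst hl => pvIdx_values_form mbl lst hl) (fun _ => ([] : List Int))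
    with ⟨g', hg', hprop⟩
  refine ⟨g', hg', fun m hm => ⟨(hprop m hm).1 List.nodup_nil, fun x => ?_⟩⟩
  rw [(hprop m hm).2 x]
  simp only [List.not_mem_nil, false_or]
  rw [pvIdx_values_mem]
  constructor
  · rintro ⟨j, hj, rfl, _, hsh⟩
    exact ⟨j, hj, rfl, hsh⟩
  · rintro ⟨j, hj, rfl, hsh⟩
    exact ⟨j, hj, rfl, hm, hsh⟩

theorem pvOfNat_inj : Function.Injective (fun j : Nat => Int.ofNat j) := by
  intro a b h
  simpa [Int.ofNat_eq_natCast] using h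

theorem pvFilter_lt_range (n m : Nat) (h : m ≤ n) (q : Nat → Bool) :
    (List.range n).filter (fun j => decide (j < m) && q j) = (List.range m).filter q := by
  rw [show n = m + (n - m) by omega, List.range_add, List.filter_append]
  have h2 : ((List.range (n - m)).map (fun x => m + x)).filter
      (fun j => decide (j < m) && q j) = [] := by
    apply List.filter_eq_nil_iff.mpr
    intro j hj
    rcases List.mem_map.mp hj with ⟨x, _, rfl⟩
    simp [Nat.not_lt.mpr (Nat.le_add_right m x)]
  have h1 : (List.range m).filter (fun j => decide (j < m) && q j)
      = (List.range m).filter q := by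
    apply List.filter_congr
    intro j hj
    simp [List.mem_range.mp hj]
  rw [h1, h2, List.append_nil]

-- the row of all partners of m, ascending
theorem pvSorted_row (mbl : List (List (String × Int))) (g : Nat → List Int) (m : Nat)
    (hnd : (g m).Nodup)
    (hmem : ∀ x, x ∈ g m ↔ ∃ j, j < mbl.length ∧ x = Int.ofNat j ∧ pvShB mbl m j = true) :
    PySem.List.sorted (g m) (fun x => x) false
      = ((List.range mbl.length).filter (fun j => pvShB mbl m j)).map (fun j => Int.ofNat j) := by
  apply PySem.List.sorted_eq_of_perm_of_pairwise_lt
  · rw [List.perm_ext_iff_of_nodup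
      (List.Nodup.map pvOfNat_inj (List.Nodup.filter _ List.nodup_range)) hnd]
    intro x
    rw [hmem x]
    constructor
    · intro hx
      rcases List.mem_map.mp hx with ⟨j, hj, rfl⟩
      rw [List.mem_filter, List.mem_range] at hj
      exact ⟨j, hj.1, rfl, hj.2⟩
    · rintro ⟨j, hj, rfl, hsh⟩
      exact List.mem_map.mpr ⟨j, by rw [List.mem_filter, List.mem_range]; exact ⟨hj, hsh⟩, rfl⟩
  · rw [List.pairwise_map]
    apply List.Pairwise.imp ?_ (List.Pairwise.filter _ List.pairwise_lt_range)
    intro a b hab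
    simpa [Int.ofNat_eq_natCast] using hab

theorem pvOrderB_eq (mbl : List (List (String × Int))) : pvOrderB mbl = pvEdge mbl := by
  rcases pvPartnersB_char mbl with ⟨g, hg, hprop⟩
  unfold pvOrderB
  rw [hg]
  rw [show (fun (o : List (List (List Int))) (i : Int) =>
      o ++ [[PySem.Set.update (PySem.Set.ofList [(-1 : Int)])
              ((PySem.List.sorted (PySem.List.pyGetD ((List.range mbl.length).map g) i [])
                (fun x => x) false).filter (fun j => j < i)),
            PySem.Set.update (PySem.Set.ofList [(mbl.length : Int)])
              ((PySem.List.sorted (PySem.List.pyGetD ((List.range mbl.length).map g) i [])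
                (fun x => x) false).filter (fun j => i < j))]])
    = (fun o x => o ++ [(fun (i : Int) =>
        [PySem.Set.update (PySem.Set.ofList [(-1 : Int)])
          ((PySem.List.sorted (PySem.List.pyGetD ((List.range mbl.length).map g) i [])
            (fun x => x) false).filter (fun j => j < i)),
         PySem.Set.update (PySem.Set.ofList [(mbl.length : Int)])
          ((PySem.List.sorted (PySem.List.pyGetD ((List.range mbl.length).map g) i [])
            (fun x => x) false).filter (fun j => i < j))]) x]) from rfl]
  rw [PySem.List.foldl_append_singleton_eq_map, PySem.List.pyRange_zero_nat, List.map_map,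
    List.nil_append]
  unfold pvEdge
  apply List.map_congr_left
  intro m hmr
  have hm : m < mbl.length := List.mem_range.mp hmr
  simp only [Function.comp]
  rw [pvGetD_mapRange _ _ _ _ hm]
  rw [pvSorted_row mbl g m ((hprop m hm).1) ((hprop m hm).2)]
  rw [List.filter_map, List.filter_map]
  rw [List.filter_filter, List.filter_filter]
  have hsm : ((List.range mbl.length).filter (fun j =>
        ((fun j => decide (j < (m : Int))) ∘ (fun j => Int.ofNat j)) j && pvShB mbl m j))
      = (List.range m).filter (fun a => pvShB mbl a m) := by
    have e1 : (fun (j : Nat) =>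
        ((fun j => decide (j < (m : Int))) ∘ (fun j => Int.ofNat j)) j && pvShB mbl m j)
        = (fun j => decide (j < m) && pvShB mbl m j) := by
      funext j
      simp [Function.comp, Int.ofNat_eq_natCast]
    rw [e1, pvFilter_lt_range mbl.length m (le_of_lt hm)]
    apply List.filter_congr
    intro j _
    rw [pvShB_symm]
  have hbg : ((List.range mbl.length).filter (fun j =>
        ((fun j => decide ((m : Int) < j)) ∘ (fun j => Int.ofNat j)) j && pvShB mbl m j))
      = (List.range mbl.length).filter (fun b => decide (m < b) && pvShB mbl m b) := by
    apply List.filter_congr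
    intro j _
    simp [Function.comp, Int.ofNat_eq_natCast]
  rw [hsm, hbg]
  have hup1 : PySem.Set.update (PySem.Set.ofList [(-1 : Int)])
      (((List.range m).filter (fun a => pvShB mbl a m)).map (fun j => Int.ofNat j))
      = pvBef mbl mbl.length m := by
    rw [show PySem.Set.ofList [(-1 : Int)] = [(-1 : Int)] from rfl]
    rw [pvUpdate_disjoint _ _ ?_ (List.Nodup.map pvOfNat_inj (List.Nodup.filter _ List.nodup_range))]
    · unfold pvBef
      rw [Nat.min_eq_left (le_of_lt hm)]
      rfl
    · intro x hx
      rcases List.mem_map.mp hx with ⟨j, _, rfl⟩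
      simp [Int.ofNat_eq_natCast]
  have hup2 : PySem.Set.update (PySem.Set.ofList [(mbl.length : Int)])
      (((List.range mbl.length).filter (fun b => decide (m < b) && pvShB mbl m b)).map
        (fun j => Int.ofNat j))
      = pvAft mbl mbl.length m := by
    rw [show PySem.Set.ofList [(mbl.length : Int)] = [(mbl.length : Int)] from rfl]
    rw [pvUpdate_disjoint _ _ ?_ (List.Nodup.map pvOfNat_inj (List.Nodup.filter _ List.nodup_range))]
    · rfl
    · intro x hx
      rcases List.mem_map.mp hx with ⟨j, hj, rfl⟩
      have := List.mem_range.mp (List.mem_filter.mp hj).1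
      simp [Int.ofNat_eq_natCast]
      omega
  rw [hup1, hup2]

theorem pvB_main (mbl : List (List (String × Int))) :
    partial_order_alt mbl = pvPropagate (pvEdge mbl) (mbl.length : Int) := by
  rw [pvB_norm, pvOrderB_eq]

-- ===== VERDICT (by name: the statement is the Claim_ definition above) =====
theorem partial_order_spec : Claim_equal_partial_order := by
  intro mbl _
  unfold Spec_partial_order
  rw [pvA_main, pvB_main]
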